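-- pv_equiv track=rewrite | github.com/felipeganho/signals-and-systems | Lab003/ex02c - Felipe Silva Ganho.py | sinal_modulo
-- ===== SOURCE A (Python) =====
-- def sinal_modulo(n):
--   modulo = []
--
--   for i in range(len(n)):
--     if i == 3 or i == 4:
--       modulo.append(1)
--     else:
--       modulo.append(0)
--
--   return modulo
-- ===== SOURCE B (Python) =====
-- def sinal_modulo(n):
--   modulo = [0] * len(n)
--   for i in (3, 4):
--     if i < len(n):
--       modulo[i] = 1
--   return modulo
-- ===== Notes on version B (the rewrite author's own statement) =====
-- stated objective: simpler
-- what changed: Replaces A's per-index scan with an if/else branch by a bulk zero-fill of the whole list plus direct assignment of 1 at the two known positions 3 and 4 (guarded for short inputs).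
import Mathlib
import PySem

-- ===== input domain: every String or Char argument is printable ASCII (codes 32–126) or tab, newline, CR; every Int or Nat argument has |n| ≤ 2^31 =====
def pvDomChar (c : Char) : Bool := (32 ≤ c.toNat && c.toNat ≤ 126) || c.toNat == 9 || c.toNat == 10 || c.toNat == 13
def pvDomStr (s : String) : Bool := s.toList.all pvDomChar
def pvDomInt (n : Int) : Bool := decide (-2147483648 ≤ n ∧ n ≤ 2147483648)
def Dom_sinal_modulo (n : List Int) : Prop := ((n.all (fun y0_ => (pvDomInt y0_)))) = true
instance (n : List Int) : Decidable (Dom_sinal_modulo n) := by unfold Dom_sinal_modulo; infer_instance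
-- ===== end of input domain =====

-- B builds the list by a bulk zero-fill plus direct placement of the 1s at indices 3 and 4 (simpler decomposition; same O(n)).

-- ===== PORT A =====
-- for i in range(len(n)): append 1 if i in {3,4} else 0
def sinal_modulo (n : List Int) : List Int :=
  (PySem.List.pyRange 0 (n.length : Int) 1).foldl
    (fun modulo i => if i == 3 || i == 4 then modulo ++ [1] else modulo ++ [0]) []

-- ===== PORT B =====
-- modulo = [0]*len(n); for i in (3,4): if i < len(n): modulo[i] = 1
def sinal_modulo_alt (n : List Int) : List Int :=
  ([3, 4] : List Nat).foldl
    (fun modulo i => if i < n.length then modulo.set i 1 else modulo)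
    (List.replicate n.length 0)

-- ===== PRECONDITION & SPEC =====
def Spec_sinal_modulo (n : List Int) (out : List Int) : Prop := out = sinal_modulo_alt n
instance (n : List Int) (out : List Int) : Decidable (Spec_sinal_modulo n out) := by unfold Spec_sinal_modulo; infer_instance

-- ===== CLAIM (what is proved, stated in full; the proofs are below) =====
def Claim_equal_sinal_modulo : Prop := ∀ (n : List Int), Dom_sinal_modulo n → Spec_sinal_modulo n (sinal_modulo n)

-- ===== LEMMAS AND PROOFS =====

theorem sinal_modulo_eq_map (n : List Int) :
    sinal_modulo n = (List.range n.length).map (fun k => if k = 3 ∨ k = 4 then (1 : Int) else 0) := by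
  unfold sinal_modulo
  rw [PySem.List.pyRange_one]
  have h : (fun (modulo : List Int) (i : Int) =>
      if i == 3 || i == 4 then modulo ++ [1] else modulo ++ [0]) =
      fun modulo i => modulo ++ [if i == 3 || i == 4 then (1 : Int) else 0] := by
    funext modulo i; split <;> simp_all
  rw [h, PySem.List.foldl_append_singleton_eq_map]
  simp only [Int.sub_zero, Int.toNat_natCast, List.map_map, Function.comp_def, Int.zero_add,
    List.nil_append]
  apply List.map_congr_left
  intro k _
  simp only [beq_iff_eq, Bool.or_eq_true]
  split_ifs <;> first | rfl | omega

theorem sinal_modulo_spec_aux (n : List Int) : sinal_modulo n = sinal_modulo_alt n := by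
  rw [sinal_modulo_eq_map]
  unfold sinal_modulo_alt
  simp only [List.foldl_cons, List.foldl_nil]
  apply List.ext_getElem
  · simp only [List.length_map, List.length_range]
    split <;> split <;> simp
  · intro k hk _
    have hk' : k < n.length := by simpa using hk
    simp only [List.getElem_map, List.getElem_range]
    by_cases h4 : 4 < n.length
    · have h3 : 3 < n.length := by omega
      simp only [h4, h3, if_true, List.getElem_set, List.getElem_replicate]
      split_ifs <;> first | rfl | omega
    · by_cases h3 : 3 < n.length
      · simp only [h4, h3, if_true, if_false, List.getElem_set, List.getElem_replicate]
        split_ifs <;> first | rfl | omega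
      · simp only [h4, h3, if_false, List.getElem_replicate]
        split_ifs <;> first | rfl | omega

-- ===== VERDICT (by name: the statement is the Claim_ definition above) =====
theorem sinal_modulo_spec : Claim_equal_sinal_modulo := by
  intro n _
  exact sinal_modulo_spec_aux n
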